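-- pv_equiv track=rewrite | github.com/RosettaCommons/rosetta | source/src/apps/public/DRRAFTER/DRRAFTER_util.py | get_helix_stems
-- ===== SOURCE A (Python) =====
-- def get_helix_stems( secstruct ):
--
--     def get_bp_list(secstruct):
--         left_base_in_bp = []
--         bp = []
--         for i, char in enumerate(secstruct):
--             if char == '(':
--                 left_base_in_bp.append(i + 1)
--             elif char == ')':
--                 if not left_base_in_bp:
--                     raise ValueError("Invalid secstruct!")
--                 bp.append((left_base_in_bp.pop(), i + 1))
--         if left_base_in_bp:
--             raise ValueError("Invalid secstruct!")
--         for i, char in enumerate(secstruct):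
--             if char == '[':
--                 left_base_in_bp.append(i + 1)
--             elif char == ']':
--                 if not left_base_in_bp:
--                     raise ValueError("Invalid secstruct!")
--                 bp.append((left_base_in_bp.pop(), i + 1))
--         if left_base_in_bp:
--             raise ValueError("Invalid secstruct!")
--         for i, char in enumerate(secstruct):
--             if char == '{':
--                 left_base_in_bp.append(i + 1)
--             elif char == '}':
--                 if not left_base_in_bp:
--                     raise ValueError("Invalid secstruct!")
--                 bp.append((left_base_in_bp.pop(), i + 1))
--         if left_base_in_bp:
--             raise ValueError("Invalid secstruct!")
--         for i, char in enumerate(secstruct):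
--             if char == '<':
--                 left_base_in_bp.append(i + 1)
--             elif char == '>':
--                 if not left_base_in_bp:
--                     raise ValueError("Invalid secstruct!")
--                 bp.append((left_base_in_bp.pop(), i + 1))
--         if left_base_in_bp:
--             raise ValueError("Invalid secstruct!")
--         return bp
--
--     def get_stems(bp):
--         stems = []
--         stem = []
--         for i, j in bp:
--             if (not stem) or (i - 1 == stem[-1][0] and j + 1 == stem[-1][1]):
--                 stem.append((i, j))
--             else:
--                 stems.append(stem)
--                 stem = [(i, j)]
--         if stem:
--             stems.append(stem)
--         return stems
--
--     bp = sorted(get_bp_list(secstruct))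
--     return get_stems(bp)
-- ===== SOURCE B (Python) =====
-- def get_helix_stems(secstruct):
--     # One pass over secstruct with a stack per bracket family, then group sorted pairs in place.
--     closer_of = {')': '(', ']': '[', '}': '{', '>': '<'}
--     stacks = {'(': [], '[': [], '{': [], '<': []}
--     bp = []
--     for i, ch in enumerate(secstruct):
--         if ch in stacks:
--             stacks[ch].append(i + 1)
--         elif ch in closer_of:
--             stack = stacks[closer_of[ch]]
--             if not stack:
--                 raise ValueError("Invalid secstruct!")
--             bp.append((stack.pop(), i + 1))
--     if any(stacks.values()):
--         raise ValueError("Invalid secstruct!")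
--     stems = []
--     for i, j in sorted(bp):
--         if stems and stems[-1][-1][0] == i - 1 and stems[-1][-1][1] == j + 1:
--             stems[-1].append((i, j))
--         else:
--             stems.append([(i, j)])
--     return stems
-- ===== Notes on version B (the rewrite author's own statement) =====
-- stated objective: simpler
-- what changed: B replaces A's four sequential full-string passes (one per bracket family, each with its own stack and error checks) by a single pass with a dict of per-family stacks, and replaces the stems/stem two-accumulator grouping by appending into the last stem in place; sorted(bp) makes the pair-insertion order irrelevant.
import Mathlib
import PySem

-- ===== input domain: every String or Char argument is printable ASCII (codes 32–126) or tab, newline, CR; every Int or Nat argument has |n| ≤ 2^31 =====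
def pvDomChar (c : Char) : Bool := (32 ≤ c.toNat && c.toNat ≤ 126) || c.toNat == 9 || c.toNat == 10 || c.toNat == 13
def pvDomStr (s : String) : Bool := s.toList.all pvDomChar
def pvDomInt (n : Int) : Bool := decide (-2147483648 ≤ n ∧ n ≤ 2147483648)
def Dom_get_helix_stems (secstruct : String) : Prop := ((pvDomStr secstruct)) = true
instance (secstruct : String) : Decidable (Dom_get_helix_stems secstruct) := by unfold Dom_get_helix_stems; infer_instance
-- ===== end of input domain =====

-- B replaces A's four sequential per-family passes by one pass with a stack per bracket family,
-- and groups the sorted pairs by appending into the last stem in place (objective: simpler).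
-- Where the Python raises ValueError (unbalanced secstruct) both ports return []; Pre_ excludes those inputs.

-- ===== PORT A =====
-- A Python list used as a stack (append/pop at the end) is ported with the top at the head.
def pvLoopA (o c : Char) : List Char → Nat → List Int → List (Int × Int) →
    Option (List Int × List (Int × Int))
  | [], _, stk, bp => some (stk, bp)
  | ch :: rest, i, stk, bp =>
    if ch = o then pvLoopA o c rest (i + 1) (((i : Int) + 1) :: stk) bp
    else if ch = c then
      match stk with
      | [] => none
      | l :: stk' => pvLoopA o c rest (i + 1) stk' (bp ++ [(l, (i : Int) + 1)])
    else pvLoopA o c rest (i + 1) stk bp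

def pvPassA (o c : Char) (cs : List Char) (bp : List (Int × Int)) : Option (List (Int × Int)) :=
  match pvLoopA o c cs 0 [] bp with
  | none => none
  | some (stk, bp') => if stk = [] then some bp' else none

def pvGetBpListA (cs : List Char) : Option (List (Int × Int)) :=
  match pvPassA '(' ')' cs [] with
  | none => none
  | some bp1 =>
    match pvPassA '[' ']' cs bp1 with
    | none => none
    | some bp2 =>
      match pvPassA '{' '}' cs bp2 with
      | none => none
      | some bp3 => pvPassA '<' '>' cs bp3

def pvStemsLoopA : List (Int × Int) → List (List (Int × Int)) → List (Int × Int) →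
    List (List (Int × Int)) × List (Int × Int)
  | [], stems, stem => (stems, stem)
  | (i, j) :: rest, stems, stem =>
    match stem.getLast? with
    | none => pvStemsLoopA rest stems (stem ++ [(i, j)])      -- the 'not stem' branch
    | some (a, b) =>
      if i - 1 = a ∧ j + 1 = b then pvStemsLoopA rest stems (stem ++ [(i, j)])
      else pvStemsLoopA rest (stems ++ [stem]) [(i, j)]

def pvGetStemsA (bp : List (Int × Int)) : List (List (Int × Int)) :=
  match pvStemsLoopA bp [] [] with
  | (stems, stem) => if stem = [] then stems else stems ++ [stem]

def get_helix_stems (secstruct : String) : List (List (Int × Int)) :=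
  match pvGetBpListA secstruct.toList with
  | none => []      -- Python raises ValueError here; outside Pre_
  | some bp => pvGetStemsA (PySem.List.sorted2 bp (fun x => x.1) (fun x => x.2) false)

-- ===== PORT B =====
-- Source B's dict of stacks has the four constant keys '(' '[' '{' '<'; it is ported as four stack
-- components (top at the head); the branch order follows Source B's membership tests.
def pvLoopB : List Char → Nat → List Int → List Int → List Int → List Int → List (Int × Int) →
    Option (List Int × List Int × List Int × List Int × List (Int × Int))
  | [], _, s1, s2, s3, s4, bp => some (s1, s2, s3, s4, bp)
  | ch :: rest, i, s1, s2, s3, s4, bp =>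
    if ch = '(' then pvLoopB rest (i + 1) (((i : Int) + 1) :: s1) s2 s3 s4 bp
    else if ch = '[' then pvLoopB rest (i + 1) s1 (((i : Int) + 1) :: s2) s3 s4 bp
    else if ch = '{' then pvLoopB rest (i + 1) s1 s2 (((i : Int) + 1) :: s3) s4 bp
    else if ch = '<' then pvLoopB rest (i + 1) s1 s2 s3 (((i : Int) + 1) :: s4) bp
    else if ch = ')' then
      match s1 with
      | [] => none
      | l :: s1' => pvLoopB rest (i + 1) s1' s2 s3 s4 (bp ++ [(l, (i : Int) + 1)])
    else if ch = ']' then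
      match s2 with
      | [] => none
      | l :: s2' => pvLoopB rest (i + 1) s1 s2' s3 s4 (bp ++ [(l, (i : Int) + 1)])
    else if ch = '}' then
      match s3 with
      | [] => none
      | l :: s3' => pvLoopB rest (i + 1) s1 s2 s3' s4 (bp ++ [(l, (i : Int) + 1)])
    else if ch = '>' then
      match s4 with
      | [] => none
      | l :: s4' => pvLoopB rest (i + 1) s1 s2 s3 s4' (bp ++ [(l, (i : Int) + 1)])
    else pvLoopB rest (i + 1) s1 s2 s3 s4 bp

def pvGroupB : List (Int × Int) → List (List (Int × Int)) → List (List (Int × Int))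
  | [], stems => stems
  | (i, j) :: rest, stems =>
    match stems.getLast? with
    | none => pvGroupB rest (stems ++ [[(i, j)]])      -- the 'not stems' branch
    | some stem =>
      match stem.getLast? with
      | none => pvGroupB rest (stems ++ [[(i, j)]])    -- unreachable: entries of stems are nonempty
      | some (a, b) =>
        if a = i - 1 ∧ b = j + 1 then pvGroupB rest (stems.dropLast ++ [stem ++ [(i, j)]])
        else pvGroupB rest (stems ++ [[(i, j)]])

def get_helix_stems_alt (secstruct : String) : List (List (Int × Int)) :=
  match pvLoopB secstruct.toList 0 [] [] [] [] [] with
  | none => []      -- Python raises ValueError here; outside Pre_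
  | some (s1, s2, s3, s4, bp) =>
    if s1 = [] ∧ s2 = [] ∧ s3 = [] ∧ s4 = [] then
      pvGroupB (PySem.List.sorted2 bp (fun x => x.1) (fun x => x.2) false) []
    else []         -- Python raises ValueError here; outside Pre_

-- ===== PRECONDITION & SPEC =====
-- Pre_ excludes exactly the inputs on which the Python raises ValueError ('Invalid secstruct!'):
-- strings in which some bracket family is unbalanced (a prefix with more closers than openers,
-- or unequal totals). Both A and B raise there.
abbrev pvBalanced (o c : Char) (cs : List Char) : Prop :=
  (∀ n ≤ cs.length, (cs.take n).count c ≤ (cs.take n).count o) ∧ cs.count o = cs.count c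

def Pre_get_helix_stems (secstruct : String) : Prop :=
  pvBalanced '(' ')' secstruct.toList ∧ pvBalanced '[' ']' secstruct.toList ∧
  pvBalanced '{' '}' secstruct.toList ∧ pvBalanced '<' '>' secstruct.toList

instance (secstruct : String) : Decidable (Pre_get_helix_stems secstruct) := by
  unfold Pre_get_helix_stems; infer_instance

def pvWitness_get_helix_stems : String := "((..[[<{.}>]]..))"

def Spec_get_helix_stems (secstruct : String) (out : List (List (Int × Int))) : Prop :=
  out = get_helix_stems_alt secstruct
instance (secstruct : String) (out : List (List (Int × Int))) : Decidable (Spec_get_helix_stems secstruct out) := by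
  unfold Spec_get_helix_stems; infer_instance

-- ===== CLAIM (what is proved, stated in full; the proofs are below) =====
def Claim_equal_get_helix_stems : Prop := ∀ (secstruct : String), Dom_get_helix_stems secstruct → Pre_get_helix_stems secstruct → Spec_get_helix_stems secstruct (get_helix_stems secstruct)

-- ===== LEMMAS AND PROOFS =====

-- accumulator normalization for A's loop
theorem pvLoopA_acc (o c : Char) (cs : List Char) (i : Nat) (stk : List Int) (bp : List (Int × Int)) :
    pvLoopA o c cs i stk bp = (pvLoopA o c cs i stk []).map (fun r => (r.1, bp ++ r.2)) := by
  induction cs generalizing i stk bp with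
  | nil => simp [pvLoopA]
  | cons ch rest ih =>
    by_cases h1 : ch = o
    · simp only [pvLoopA, if_pos h1]
      rw [ih]
    · by_cases h2 : ch = c
      · cases stk with
        | nil =>
          simp only [pvLoopA, if_neg h1, if_pos h2]
          rfl
        | cons l stk' =>
          simp only [pvLoopA, if_neg h1, if_pos h2, List.nil_append]
          conv_lhs => rw [ih]
          conv_rhs => rw [ih]
          cases hE : pvLoopA o c rest (i + 1) stk' [] <;> simp [List.append_assoc]
      · simp only [pvLoopA, if_neg h1, if_neg h2]
        rw [ih]

-- A's single-family loop succeeds (with empty final stack) on a family-balanced string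
theorem pvLoopA_success (o c : Char) (hoc : o ≠ c) : ∀ (cs : List Char) (i : Nat) (stk : List Int),
    (∀ n ≤ cs.length, (cs.take n).count c ≤ (cs.take n).count o + stk.length) →
    (cs.count o + stk.length = cs.count c) →
    ∃ q, pvLoopA o c cs i stk [] = some ([], q) := by
  intro cs
  induction cs with
  | nil =>
    intro i stk _ hc
    simp only [List.count_nil] at hc
    have hstk : stk = [] := List.length_eq_zero_iff.mp (by omega)
    subst hstk
    exact ⟨[], by simp [pvLoopA]⟩
  | cons ch rest ih =>
    intro i stk h hc
    have hlen : ∀ n, n ≤ rest.length → n + 1 ≤ (ch :: rest).length := by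
      intro n hn; simp only [List.length_cons]; omega
    by_cases h1 : ch = o
    · subst h1
      simp only [pvLoopA, if_pos rfl]
      apply ih (i + 1) (((i : Int) + 1) :: stk)
      · intro n hn
        have hh := h (n + 1) (hlen n hn)
        simp [List.take_succ_cons, hoc] at hh
        simp only [List.length_cons]
        omega
      · simp [hoc] at hc
        simp only [List.length_cons]
        omega
    · by_cases h2 : ch = c
      · subst h2
        cases stk with
        | nil =>
          exfalso
          have h1' := h 1 (by simp only [List.length_cons]; omega)
          simp [List.take_succ_cons, h1] at h1'
        | cons l stk' =>
          simp only [pvLoopA, if_neg h1, if_pos rfl, List.nil_append]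
          rw [pvLoopA_acc]
          obtain ⟨q, hq⟩ := ih (i + 1) stk'
            (fun n hn => by
              have hh := h (n + 1) (hlen n hn)
              simp [List.take_succ_cons, h1] at hh
              omega)
            (by
              have hc' := hc
              simp [h1] at hc'
              omega)
          exact ⟨(l, (i : Int) + 1) :: q, by rw [hq]; rfl⟩
      · simp only [pvLoopA, if_neg h1, if_neg h2]
        apply ih (i + 1) stk
        · intro n hn
          have hh := h (n + 1) (hlen n hn)
          simp [List.take_succ_cons, h1, h2] at hh
          omega
        · simp [h1, h2] at hc
          omega

-- accumulator normalization for B's loop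
theorem pvLoopB_acc (cs : List Char) (i : Nat) (s1 s2 s3 s4 : List Int) (bp : List (Int × Int)) :
    pvLoopB cs i s1 s2 s3 s4 bp
      = (pvLoopB cs i s1 s2 s3 s4 []).map
          (fun r => (r.1, r.2.1, r.2.2.1, r.2.2.2.1, bp ++ r.2.2.2.2)) := by
  induction cs generalizing i s1 s2 s3 s4 bp with
  | nil => simp [pvLoopB]
  | cons ch rest ih =>
    simp only [pvLoopB]
    split_ifs with h1 h2 h3 h4 h5 h6 h7 h8
    · rw [ih]
    · rw [ih]
    · rw [ih]
    · rw [ih]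
    · cases s1 with
      | nil => simp
      | cons l s1' =>
        simp only [List.nil_append]
        conv_lhs => rw [ih]
        conv_rhs => rw [ih]
        cases hE : pvLoopB rest (i + 1) s1' s2 s3 s4 [] <;> simp [List.append_assoc]
    · cases s2 with
      | nil => simp
      | cons l s2' =>
        simp only [List.nil_append]
        conv_lhs => rw [ih]
        conv_rhs => rw [ih]
        cases hE : pvLoopB rest (i + 1) s1 s2' s3 s4 [] <;> simp [List.append_assoc]
    · cases s3 with
      | nil => simp
      | cons l s3' =>
        simp only [List.nil_append]
        conv_lhs => rw [ih]
        conv_rhs => rw [ih]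
        cases hE : pvLoopB rest (i + 1) s1 s2 s3' s4 [] <;> simp [List.append_assoc]
    · cases s4 with
      | nil => simp
      | cons l s4' =>
        simp only [List.nil_append]
        conv_lhs => rw [ih]
        conv_rhs => rw [ih]
        cases hE : pvLoopB rest (i + 1) s1 s2 s3 s4' [] <;> simp [List.append_assoc]
    · rw [ih]

-- B's one pass produces each family's final stack and a permutation of the concatenated pair lists
theorem pvLoopB_of_A : ∀ (cs : List Char) (i : Nat) (s1 s2 s3 s4 t1 t2 t3 t4 : List Int)
    (q1 q2 q3 q4 : List (Int × Int)),
    pvLoopA '(' ')' cs i s1 [] = some (t1, q1) →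
    pvLoopA '[' ']' cs i s2 [] = some (t2, q2) →
    pvLoopA '{' '}' cs i s3 [] = some (t3, q3) →
    pvLoopA '<' '>' cs i s4 [] = some (t4, q4) →
    ∃ q, pvLoopB cs i s1 s2 s3 s4 [] = some (t1, t2, t3, t4, q) ∧
      q.Perm (q1 ++ q2 ++ q3 ++ q4) := by
  intro cs
  induction cs with
  | nil =>
    intro i s1 s2 s3 s4 t1 t2 t3 t4 q1 q2 q3 q4 h1 h2 h3 h4
    simp only [pvLoopA, Option.some.injEq, Prod.mk.injEq] at h1 h2 h3 h4
    obtain ⟨rfl, rfl⟩ := h1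
    obtain ⟨rfl, rfl⟩ := h2
    obtain ⟨rfl, rfl⟩ := h3
    obtain ⟨rfl, rfl⟩ := h4
    exact ⟨[], rfl, by simp⟩
  | cons ch rest ih =>
    intro i s1 s2 s3 s4 t1 t2 t3 t4 q1 q2 q3 q4 h1 h2 h3 h4
    by_cases hc1 : ch = '('
    · subst hc1
      simp [pvLoopA] at h1 h2 h3 h4
      obtain ⟨q, hB, hp⟩ := ih _ _ _ _ _ _ _ _ _ _ _ _ _ h1 h2 h3 h4
      exact ⟨q, by simp [pvLoopB, hB], hp⟩
    · by_cases hc2 : ch = '['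
      · subst hc2
        simp [pvLoopA] at h1 h2 h3 h4
        obtain ⟨q, hB, hp⟩ := ih _ _ _ _ _ _ _ _ _ _ _ _ _ h1 h2 h3 h4
        exact ⟨q, by simp [pvLoopB, hB], hp⟩
      · by_cases hc3 : ch = '{'
        · subst hc3
          simp [pvLoopA] at h1 h2 h3 h4
          obtain ⟨q, hB, hp⟩ := ih _ _ _ _ _ _ _ _ _ _ _ _ _ h1 h2 h3 h4
          exact ⟨q, by simp [pvLoopB, hB], hp⟩
        · by_cases hc4 : ch = '<'
          · subst hc4
            simp [pvLoopA] at h1 h2 h3 h4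
            obtain ⟨q, hB, hp⟩ := ih _ _ _ _ _ _ _ _ _ _ _ _ _ h1 h2 h3 h4
            exact ⟨q, by simp [pvLoopB, hB], hp⟩
          · by_cases hc5 : ch = ')'
            · subst hc5
              rw [show pvLoopA '[' ']' (')' :: rest) i s2 [] = pvLoopA '[' ']' rest (i + 1) s2 [] from rfl] at h2
              rw [show pvLoopA '{' '}' (')' :: rest) i s3 [] = pvLoopA '{' '}' rest (i + 1) s3 [] from rfl] at h3
              rw [show pvLoopA '<' '>' (')' :: rest) i s4 [] = pvLoopA '<' '>' rest (i + 1) s4 [] from rfl] at h4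
              cases s1 with
              | nil =>
                rw [show pvLoopA '(' ')' (')' :: rest) i ([] : List Int) [] = none from rfl] at h1
                simp at h1
              | cons l s1' =>
                rw [show pvLoopA '(' ')' (')' :: rest) i (l :: s1') []
                  = pvLoopA '(' ')' rest (i + 1) s1' [(l, (i : Int) + 1)] from rfl] at h1
                rw [pvLoopA_acc] at h1
                obtain ⟨⟨t1p, q1p⟩, hbase, hf⟩ := Option.map_eq_some_iff.mp h1
                simp only [Prod.mk.injEq] at hf
                obtain ⟨rfl, rfl⟩ := hf
                obtain ⟨q, hB, hp⟩ := ih _ _ _ _ _ _ _ _ _ _ _ _ _ hbase h2 h3 h4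
                refine ⟨(l, (i : Int) + 1) :: q, ?_, ?_⟩
                · rw [show pvLoopB (')' :: rest) i (l :: s1') s2 s3 s4 []
                    = pvLoopB rest (i + 1) s1' s2 s3 s4 [(l, (i : Int) + 1)] from rfl]
                  rw [pvLoopB_acc, hB]
                  rfl
                · simpa using hp.cons ((l, (i : Int) + 1))
            · by_cases hc6 : ch = ']'
              · subst hc6
                rw [show pvLoopA '(' ')' (']' :: rest) i s1 [] = pvLoopA '(' ')' rest (i + 1) s1 [] from rfl] at h1
                rw [show pvLoopA '{' '}' (']' :: rest) i s3 [] = pvLoopA '{' '}' rest (i + 1) s3 [] from rfl] at h3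
                rw [show pvLoopA '<' '>' (']' :: rest) i s4 [] = pvLoopA '<' '>' rest (i + 1) s4 [] from rfl] at h4
                cases s2 with
                | nil =>
                  rw [show pvLoopA '[' ']' (']' :: rest) i ([] : List Int) [] = none from rfl] at h2
                  simp at h2
                | cons l s2' =>
                  rw [show pvLoopA '[' ']' (']' :: rest) i (l :: s2') []
                    = pvLoopA '[' ']' rest (i + 1) s2' [(l, (i : Int) + 1)] from rfl] at h2
                  rw [pvLoopA_acc] at h2
                  obtain ⟨⟨t2p, q2p⟩, hbase, hf⟩ := Option.map_eq_some_iff.mp h2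
                  simp only [Prod.mk.injEq] at hf
                  obtain ⟨rfl, rfl⟩ := hf
                  obtain ⟨q, hB, hp⟩ := ih _ _ _ _ _ _ _ _ _ _ _ _ _ h1 hbase h3 h4
                  refine ⟨(l, (i : Int) + 1) :: q, ?_, ?_⟩
                  · rw [show pvLoopB (']' :: rest) i s1 (l :: s2') s3 s4 []
                      = pvLoopB rest (i + 1) s1 s2' s3 s4 [(l, (i : Int) + 1)] from rfl]
                    rw [pvLoopB_acc, hB]
                    rfl
                  · refine (hp.cons ((l, (i : Int) + 1))).trans ?_
                    have hm := List.perm_middle (a := (l, (i : Int) + 1)) (l₁ := q1)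
                      (l₂ := q2p ++ q3 ++ q4)
                    simpa [List.append_assoc] using hm.symm
              · by_cases hc7 : ch = '}'
                · subst hc7
                  rw [show pvLoopA '(' ')' ('}' :: rest) i s1 [] = pvLoopA '(' ')' rest (i + 1) s1 [] from rfl] at h1
                  rw [show pvLoopA '[' ']' ('}' :: rest) i s2 [] = pvLoopA '[' ']' rest (i + 1) s2 [] from rfl] at h2
                  rw [show pvLoopA '<' '>' ('}' :: rest) i s4 [] = pvLoopA '<' '>' rest (i + 1) s4 [] from rfl] at h4
                  cases s3 with
                  | nil =>
                    rw [show pvLoopA '{' '}' ('}' :: rest) i ([] : List Int) [] = none from rfl] at h3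
                    simp at h3
                  | cons l s3' =>
                    rw [show pvLoopA '{' '}' ('}' :: rest) i (l :: s3') []
                      = pvLoopA '{' '}' rest (i + 1) s3' [(l, (i : Int) + 1)] from rfl] at h3
                    rw [pvLoopA_acc] at h3
                    obtain ⟨⟨t3p, q3p⟩, hbase, hf⟩ := Option.map_eq_some_iff.mp h3
                    simp only [Prod.mk.injEq] at hf
                    obtain ⟨rfl, rfl⟩ := hf
                    obtain ⟨q, hB, hp⟩ := ih _ _ _ _ _ _ _ _ _ _ _ _ _ h1 h2 hbase h4
                    refine ⟨(l, (i : Int) + 1) :: q, ?_, ?_⟩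
                    · rw [show pvLoopB ('}' :: rest) i s1 s2 (l :: s3') s4 []
                        = pvLoopB rest (i + 1) s1 s2 s3' s4 [(l, (i : Int) + 1)] from rfl]
                      rw [pvLoopB_acc, hB]
                      rfl
                    · refine (hp.cons ((l, (i : Int) + 1))).trans ?_
                      have hm := List.perm_middle (a := (l, (i : Int) + 1)) (l₁ := q1 ++ q2)
                        (l₂ := q3p ++ q4)
                      simpa [List.append_assoc] using hm.symm
                · by_cases hc8 : ch = '>'
                  · subst hc8
                    rw [show pvLoopA '(' ')' ('>' :: rest) i s1 [] = pvLoopA '(' ')' rest (i + 1) s1 [] from rfl] at h1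
                    rw [show pvLoopA '[' ']' ('>' :: rest) i s2 [] = pvLoopA '[' ']' rest (i + 1) s2 [] from rfl] at h2
                    rw [show pvLoopA '{' '}' ('>' :: rest) i s3 [] = pvLoopA '{' '}' rest (i + 1) s3 [] from rfl] at h3
                    cases s4 with
                    | nil =>
                      rw [show pvLoopA '<' '>' ('>' :: rest) i ([] : List Int) [] = none from rfl] at h4
                      simp at h4
                    | cons l s4' =>
                      rw [show pvLoopA '<' '>' ('>' :: rest) i (l :: s4') []
                        = pvLoopA '<' '>' rest (i + 1) s4' [(l, (i : Int) + 1)] from rfl] at h4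
                      rw [pvLoopA_acc] at h4
                      obtain ⟨⟨t4p, q4p⟩, hbase, hf⟩ := Option.map_eq_some_iff.mp h4
                      simp only [Prod.mk.injEq] at hf
                      obtain ⟨rfl, rfl⟩ := hf
                      obtain ⟨q, hB, hp⟩ := ih _ _ _ _ _ _ _ _ _ _ _ _ _ h1 h2 h3 hbase
                      refine ⟨(l, (i : Int) + 1) :: q, ?_, ?_⟩
                      · rw [show pvLoopB ('>' :: rest) i s1 s2 s3 (l :: s4') []
                          = pvLoopB rest (i + 1) s1 s2 s3 s4' [(l, (i : Int) + 1)] from rfl]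
                        rw [pvLoopB_acc, hB]
                        rfl
                      · refine (hp.cons ((l, (i : Int) + 1))).trans ?_
                        have hm := List.perm_middle (a := (l, (i : Int) + 1))
                          (l₁ := q1 ++ q2 ++ q3) (l₂ := q4p)
                        simpa [List.append_assoc] using hm.symm
                  · simp [pvLoopA, hc1, hc2, hc3, hc4, hc5, hc6, hc7, hc8] at h1 h2 h3 h4
                    obtain ⟨q, hB, hp⟩ := ih _ _ _ _ _ _ _ _ _ _ _ _ _ h1 h2 h3 h4
                    exact ⟨q, by simp [pvLoopB, hc1, hc2, hc3, hc4, hc5, hc6, hc7, hc8, hB], hp⟩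

-- B's in-place grouping equals A's two-accumulator grouping
theorem pvGroup_eq : ∀ (bp : List (Int × Int)) (stems : List (List (Int × Int)))
    (stem : List (Int × Int)), stem ≠ [] →
    pvGroupB bp (stems ++ [stem])
      = (pvStemsLoopA bp stems stem).1 ++ [(pvStemsLoopA bp stems stem).2] ∧
    (pvStemsLoopA bp stems stem).2 ≠ [] := by
  intro bp
  induction bp with
  | nil =>
    intro stems stem h
    exact ⟨rfl, h⟩
  | cons p rest ih =>
    obtain ⟨i, j⟩ := p
    intro stems stem h
    rcases List.eq_nil_or_concat stem with rfl | ⟨stem', ⟨a, b⟩, rfl⟩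
    · exact absurd rfl h
    · simp only [List.concat_eq_append, pvGroupB, pvStemsLoopA, List.getLast?_concat]
      by_cases hcond : i - 1 = a ∧ j + 1 = b
      · have hc2 : a = i - 1 ∧ b = j + 1 := ⟨hcond.1.symm, hcond.2.symm⟩
        rw [if_pos hc2, if_pos hcond, List.dropLast_concat]
        exact ih stems ((stem' ++ [(a, b)]) ++ [(i, j)]) (by simp)
      · have hc2 : ¬(a = i - 1 ∧ b = j + 1) := fun hx => hcond ⟨hx.1.symm, hx.2.symm⟩
        rw [if_neg hc2, if_neg hcond]
        exact ih (stems ++ [stem' ++ [(a, b)]]) [(i, j)] (by simp)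

theorem pvStems_eq (bp : List (Int × Int)) : pvGroupB bp [] = pvGetStemsA bp := by
  cases bp with
  | nil => rfl
  | cons p rest =>
    obtain ⟨i, j⟩ := p
    obtain ⟨hEq, hne⟩ := pvGroup_eq rest [] [(i, j)] (by simp)
    simp only [List.nil_append] at hEq
    simp only [pvGroupB, pvGetStemsA, pvStemsLoopA, List.getLast?_nil, List.nil_append]
    rw [hEq]
    cases hSL : pvStemsLoopA rest [] [(i, j)] with
    | mk ss st =>
      rw [hSL] at hne
      simp only [ne_eq] at hne
      simp [hne]

-- Python's tuple sort: sorted2 with fst/snd is sorted with the lexicographic key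
theorem pvSorted2_eq (bp : List (Int × Int)) :
    PySem.List.sorted2 bp (fun x => x.1) (fun x => x.2) false
      = PySem.List.sorted bp (fun x => toLex x) false := by
  rw [PySem.List.sorted_eq_foldl_insertBy]
  unfold PySem.List.sorted2
  simp only []
  congr 1
  funext acc x
  congr 1
  funext p r
  obtain ⟨a1, a2⟩ := p
  obtain ⟨b1, b2⟩ := r
  rcases lt_trichotomy a1 b1 with hlt | heq | hgt
  · simp [Prod.Lex.lt_iff, hlt, not_lt_of_gt hlt]
  · subst heq
    simp [Prod.Lex.lt_iff]
  · simp [Prod.Lex.lt_iff, hgt, not_lt_of_gt hgt, ne_of_gt hgt]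

-- ===== VERDICT (by name: the statement is the Claim_ definition above) =====
theorem get_helix_stems_spec : Claim_equal_get_helix_stems := by
  intro s _ hPre
  obtain ⟨⟨hp1, ht1⟩, ⟨hp2, ht2⟩, ⟨hp3, ht3⟩, ⟨hp4, ht4⟩⟩ := hPre
  obtain ⟨q1, h1⟩ := pvLoopA_success '(' ')' (by decide) s.toList 0 []
    (fun n hn => by simpa using hp1 n hn) (by simpa using ht1)
  obtain ⟨q2, h2⟩ := pvLoopA_success '[' ']' (by decide) s.toList 0 []
    (fun n hn => by simpa using hp2 n hn) (by simpa using ht2)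
  obtain ⟨q3, h3⟩ := pvLoopA_success '{' '}' (by decide) s.toList 0 []
    (fun n hn => by simpa using hp3 n hn) (by simpa using ht3)
  obtain ⟨q4, h4⟩ := pvLoopA_success '<' '>' (by decide) s.toList 0 []
    (fun n hn => by simpa using hp4 n hn) (by simpa using ht4)
  obtain ⟨q, hB, hperm⟩ := pvLoopB_of_A s.toList 0 [] [] [] [] [] [] [] [] q1 q2 q3 q4 h1 h2 h3 h4
  have hPass1 : pvPassA '(' ')' s.toList [] = some q1 := by
    unfold pvPassA; rw [h1]; rfl
  have hPass2 : pvPassA '[' ']' s.toList q1 = some (q1 ++ q2) := by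
    unfold pvPassA; rw [pvLoopA_acc '[' ']' s.toList 0 [] q1, h2]; rfl
  have hPass3 : pvPassA '{' '}' s.toList (q1 ++ q2) = some (q1 ++ q2 ++ q3) := by
    unfold pvPassA; rw [pvLoopA_acc '{' '}' s.toList 0 [] (q1 ++ q2), h3]; rfl
  have hPass4 : pvPassA '<' '>' s.toList (q1 ++ q2 ++ q3) = some (q1 ++ q2 ++ q3 ++ q4) := by
    unfold pvPassA; rw [pvLoopA_acc '<' '>' s.toList 0 [] (q1 ++ q2 ++ q3), h4]; rfl
  have hAbp : pvGetBpListA s.toList = some (q1 ++ q2 ++ q3 ++ q4) := by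
    unfold pvGetBpListA
    rw [hPass1]
    simp only []
    rw [hPass2]
    simp only []
    rw [hPass3]
    simp only []
    exact hPass4
  have hsort : PySem.List.sorted2 (q1 ++ q2 ++ q3 ++ q4) (fun x => x.1) (fun x => x.2) false
      = PySem.List.sorted2 q (fun x => x.1) (fun x => x.2) false := by
    rw [pvSorted2_eq, pvSorted2_eq]
    exact (PySem.List.sorted_eq_sorted_of_perm q (q1 ++ q2 ++ q3 ++ q4)
      (fun x => toLex x) toLex.injective hperm).symm
  show get_helix_stems s = get_helix_stems_alt s
  calc get_helix_stems s
      = pvGetStemsA (PySem.List.sorted2 (q1 ++ q2 ++ q3 ++ q4)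
          (fun x => x.1) (fun x => x.2) false) := by
        simp [get_helix_stems, hAbp]
    _ = pvGroupB (PySem.List.sorted2 (q1 ++ q2 ++ q3 ++ q4)
          (fun x => x.1) (fun x => x.2) false) [] := (pvStems_eq _).symm
    _ = pvGroupB (PySem.List.sorted2 q (fun x => x.1) (fun x => x.2) false) [] := by rw [hsort]
    _ = get_helix_stems_alt s := by simp [get_helix_stems_alt, hB]
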